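-- pv_equiv track=rewrite | github.com/sebalp1987/ine_fuzzy_rules | utils/algorithm_rules.py | init_finish_bad_typo
-- ===== SOURCE A (Python) =====
-- def init_finish_bad_typo(string, bad_char='-'):
--
--     length = len(string)
--     string_return = ''
--
--     for i, char in enumerate(string):
--         if i == 0 or i ==length-1 and char == bad_char:
--             char = char.replace(bad_char,'')
--
--         string_return += char
--
--     return string_return
-- ===== SOURCE B (Python) =====
-- def init_finish_bad_typo(string, bad_char='-'):
--     s = string
--     if s and s[0] == bad_char:
--         s = s[1:]
--     if s and s[-1] == bad_char:
--         s = s[:-1]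
--     return s
-- ===== Notes on version B (the rewrite author's own statement) =====
-- stated objective: simpler
-- what changed: Replaced the per-character enumerate loop (string concatenation with char.replace at the endpoints) by two endpoint checks with slicing: drop the first char if it equals bad_char, then the last char if it equals bad_char.
import Mathlib
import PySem

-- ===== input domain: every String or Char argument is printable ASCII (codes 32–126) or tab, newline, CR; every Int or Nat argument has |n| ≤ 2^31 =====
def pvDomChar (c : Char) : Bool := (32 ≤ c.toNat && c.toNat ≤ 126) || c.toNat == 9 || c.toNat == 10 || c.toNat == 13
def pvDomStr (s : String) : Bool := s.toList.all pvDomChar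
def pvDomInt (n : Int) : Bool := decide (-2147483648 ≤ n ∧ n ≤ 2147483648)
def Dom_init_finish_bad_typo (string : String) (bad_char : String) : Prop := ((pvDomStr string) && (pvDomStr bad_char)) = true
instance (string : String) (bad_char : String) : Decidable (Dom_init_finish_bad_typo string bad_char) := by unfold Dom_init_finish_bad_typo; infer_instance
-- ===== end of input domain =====

-- B replaces A's per-character enumerate loop (string concatenation with char.replace at the
-- endpoints) by two endpoint checks with slicing; objective: simpler, same result everywhere.

-- ===== PORT A =====
-- literal transliteration: length = len(string); accumulate string_return over enumerate(string);
-- the condition keeps Python's precedence: i == 0 or (i == length-1 and char == bad_char)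
def init_finish_bad_typo (string : String) (bad_char : String) : String :=
  let length : Int := PySem.Str.len string
  (PySem.List.enumerate string.toList).foldl
    (fun string_return p =>
      let char := String.singleton p.2
      let char :=
        if p.1 = 0 ∨ (p.1 = length - 1 ∧ char = bad_char)
        then PySem.Str.replace char bad_char "" else char
      string_return ++ char) ""

-- ===== PORT B =====
-- literal transliteration of Source B:
--   if s and s[0] == bad_char: s = s[1:];  if s and s[-1] == bad_char: s = s[:-1]
def init_finish_bad_typo_alt (string : String) (bad_char : String) : String :=
  let s := string.toList
  let s1 :=
    match s with
    | [] => []                                     -- 'if s' is false: unchanged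
    | c :: rest => if String.singleton c = bad_char then rest else c :: rest   -- s[0] == bad_char → s[1:]
  let s2 :=
    match s1.getLast? with                         -- 'if s1' false ↔ getLast? = none; s1[-1] otherwise
    | none => s1
    | some d => if String.singleton d = bad_char then s1.dropLast else s1     -- s1[:-1]
  String.ofList s2

-- ===== PRECONDITION & SPEC =====
def Spec_init_finish_bad_typo (string : String) (bad_char : String) (out : String) : Prop := out = init_finish_bad_typo_alt string bad_char
instance (string : String) (bad_char : String) (out : String) : Decidable (Spec_init_finish_bad_typo string bad_char out) := by unfold Spec_init_finish_bad_typo; infer_instance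

-- ===== CLAIM (what is proved, stated in full; the proofs are below) =====
def Claim_equal_init_finish_bad_typo : Prop := ∀ (string : String) (bad_char : String), Dom_init_finish_bad_typo string bad_char → Spec_init_finish_bad_typo string bad_char (init_finish_bad_typo string bad_char)

-- ===== LEMMAS AND PROOFS =====

-- char.replace(bad_char, '') on a single character: removes it iff it equals bad_char (List Char level)
theorem pv_rep (c : Char) (old : List Char) :
    PySem.Chars.replace [c] old [] = if old = [c] then [] else [c] := by
  cases old with
  | nil => simp [PySem.Chars.replace]
  | cons b t =>
    simp only [PySem.Chars.replace, List.isEmpty_cons, Bool.false_eq_true, if_false,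
      List.length_singleton]
    rw [PySem.Chars.replace.go]
    by_cases hb : (b :: t).isPrefixOf [c] = true
    · have : b = c ∧ t = [] := by
        cases t with
        | nil => simpa [List.isPrefixOf] using hb
        | cons x xs => simp [List.isPrefixOf] at hb
      obtain ⟨rfl, rfl⟩ := this
      rw [if_pos rfl]
      simp [PySem.Chars.replace.go]
    · rw [if_neg hb]
      have hne : ¬ (b :: t = [c]) := by
        intro h; rw [h] at hb; simp [List.isPrefixOf] at hb
      rw [if_neg hne]
      simp [PySem.Chars.replace.go]

-- the same fact at String level
theorem pv_rep_str (c : Char) (bc : String) :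
    PySem.Str.replace (String.singleton c) bc "" =
      if String.singleton c = bc then "" else String.singleton c := by
  have h := pv_rep c bc.toList
  have h1 : (String.singleton c).toList = [c] := by simp
  have h2 : ("" : String).toList = [] := rfl
  have h3 : String.singleton c = bc ↔ bc.toList = [c] := by
    constructor
    · intro hx; rw [← hx]; simp
    · intro hx
      apply String.toList_injective
      simp [hx]
  simp only [PySem.Str.replace, h1, h2, h, h3]
  by_cases he : bc.toList = [c]
  · simp [he]
  · simp only [if_neg he]
    apply String.toList_injective
    simp

-- the middle of A's loop: no index fires the branch, every char is appended unchanged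
theorem pv_mid (bc : String) (n : Int) (l : List (Int × Char)) (acc : String)
    (h : ∀ p ∈ l, ¬(p.1 = 0 ∨ (p.1 = n - 1 ∧ String.singleton p.2 = bc))) :
    l.foldl
      (fun string_return p =>
        let char := String.singleton p.2
        let char :=
          if p.1 = 0 ∨ (p.1 = n - 1 ∧ char = bc)
          then PySem.Str.replace char bc "" else char
        string_return ++ char) acc
    = acc ++ String.ofList (l.map (·.2)) := by
  induction l generalizing acc with
  | nil => simp
  | cons p t ih =>
    have hp := h p (by simp)
    simp only [List.foldl_cons, List.map_cons]
    rw [ih _ (fun q hq => h q (by simp [hq]))]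
    rw [if_neg hp]
    apply String.toList_injective
    simp

-- characterisation of A's loop over an explicit char list, as B computes it
theorem pv_main (bc : String) (cs : List Char) :
    (PySem.List.enumerate cs).foldl
      (fun string_return p =>
        let char := String.singleton p.2
        let char := if p.1 = 0 ∨ (p.1 = (cs.length : Int) - 1 ∧ char = bc)
          then PySem.Str.replace char bc "" else char
        string_return ++ char) ""
    = (let s1 := match cs with
        | [] => ([] : List Char)
        | c :: rest => if String.singleton c = bc then rest else c :: rest
       let s2 := match s1.getLast? with
        | none => s1
        | some d => if String.singleton d = bc then s1.dropLast else s1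
       String.ofList s2) := by
  cases cs with
  | nil => simp [PySem.List.enumerate]
  | cons c rest =>
    rcases List.eq_nil_or_concat' rest with rfl | ⟨mid, d, rfl⟩
    · -- cs = [c]: i = 0 fires; the last-index test never runs separately
      simp only [PySem.List.enumerate_cons, PySem.List.enumerate_nil, List.foldl_cons,
        List.foldl_nil, List.length_cons, List.length_nil, true_or, if_true]
      rw [pv_rep_str]
      by_cases hc : String.singleton c = bc
      · simp [hc]
      · simp [hc]
        apply String.toList_injective; simp
    · -- cs = c :: mid ++ [d]
      have hcond : ((0:Int) + 1 + (mid.length : Int) = 0 ∨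
          ((0:Int) + 1 + (mid.length : Int) = ((c :: (mid ++ [d])).length : Int) - 1 ∧
            String.singleton d = bc)) ↔ String.singleton d = bc := by
        simp only [List.length_cons, List.length_append, List.length_nil]
        constructor
        · rintro (h | h)
          · omega
          · exact h.2
        · intro h
          right
          refine ⟨by push_cast; omega, h⟩
      have hmid : ∀ p ∈ PySem.List.enumerate mid (0 + 1),
          ¬(p.1 = 0 ∨ (p.1 = ((c :: (mid ++ [d])).length : Int) - 1 ∧ String.singleton p.2 = bc)) := by
        intro p hp
        rw [PySem.List.mem_enumerate_iff] at hp
        obtain ⟨k, hk, rfl⟩ := hp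
        simp only [List.length_cons, List.length_append, List.length_nil]
        rintro (h | h)
        · omega
        · have := h.1; push_cast at this; omega
      simp only [PySem.List.enumerate_cons, List.foldl_cons,
        PySem.List.enumerate_append, List.foldl_append,
        PySem.List.enumerate_nil, List.foldl_nil, true_or, if_true, hcond]
      rw [pv_mid bc ((c :: (mid ++ [d])).length : Int) (PySem.List.enumerate mid (0 + 1)) _ hmid]
      simp only [PySem.List.map_snd_enumerate, pv_rep_str]
      have hgl : (c :: (mid ++ [d])).getLast? = some d := by
        rw [show c :: (mid ++ [d]) = (c :: mid) ++ [d] from rfl, List.getLast?_concat]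
      have hdl : (c :: (mid ++ [d])).dropLast = c :: mid := by
        rw [show c :: (mid ++ [d]) = (c :: mid) ++ [d] from rfl, List.dropLast_concat]
      by_cases hc : String.singleton c = bc <;> by_cases hd : String.singleton d = bc <;>
        · apply String.toList_injective
          simp [hc, hd, hgl, hdl]

-- ===== VERDICT (by name: the statement is the Claim_ definition above) =====
theorem init_finish_bad_typo_spec : Claim_equal_init_finish_bad_typo := by
  intro string bc _
  unfold Spec_init_finish_bad_typo init_finish_bad_typo init_finish_bad_typo_alt
  have hlen : PySem.Str.len string = (string.toList.length : Int) := by simp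
  rw [hlen]
  exact pv_main bc string.toList
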